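-- pv_equiv track=rewrite | github.com/giselabcruz/bio_exercises_PairWiseAligner | Exercise2/exercise3.py | formatear_bloques
-- ===== SOURCE A (Python) =====
-- from typing import Optional, Tuple, List
--
-- def formatear_bloques(alA: str, alB: str, etiqueta_arriba="Proteína A", etiqueta_abajo="Proteína B",
--                       ancho=60, off_a=0, off_b=0) -> str:
--     i = 0
--     out: List[str] = []
--     while i < len(alA):
--         sA = alA[i:i + ancho]
--         sB = alB[i:i + ancho]
--         mid = "".join(
--             '|' if (a == b and a != '-' and b != '-') else ('.' if a != '-' and b != '-' else ' ')
--             for a, b in zip(sA, sB)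
--         )
--         startA = off_a + sum(1 for c in alA[:i] if c != '-') + 1
--         endA   = startA + sum(1 for c in sA      if c != '-') - 1
--         startB = off_b + sum(1 for c in alB[:i] if c != '-') + 1
--         endB   = startB + sum(1 for c in sB      if c != '-') - 1
--
--         out.append(f"{etiqueta_arriba:<12} {startA:>6} {sA} {endA}")
--         out.append(f"{'':<12} {'':>6} {mid}")
--         out.append(f"{etiqueta_abajo:<12} {startB:>6} {sB} {endB}\n")
--         i += ancho
--     return "\n".join(out).rstrip()
-- ===== SOURCE B (Python) =====
-- def formatear_bloques(alA: str, alB: str, etiqueta_arriba="Proteína A", etiqueta_abajo="Proteína B",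
--                       ancho=60, off_a=0, off_b=0) -> str:
--     lines = []
--     posA, posB = off_a, off_b
--     for i in range(0, len(alA), ancho):
--         sA = alA[i:i + ancho]
--         sB = alB[i:i + ancho]
--         mid = "".join(
--             '|' if a == b != '-' else ('.' if a != '-' and b != '-' else ' ')
--             for a, b in zip(sA, sB)
--         )
--         nA = len(sA) - sA.count('-')
--         nB = len(sB) - sB.count('-')
--         lines.append(f"{etiqueta_arriba:<12} {posA + 1:>6} {sA} {posA + nA}")
--         lines.append(f"{'':<12} {'':>6} {mid}")
--         lines.append(f"{etiqueta_abajo:<12} {posB + 1:>6} {sB} {posB + nB}\n")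
--         posA += nA
--         posB += nB
--     return "\n".join(lines).rstrip()
-- ===== Notes on version B (the rewrite author's own statement) =====
-- stated objective: faster
-- what changed: B carries running non-gap position counters (and uses len-count('-') per chunk) through one pass over the blocks instead of A's re-summing of the whole non-gap prefix of both strings at every block, removing the quadratic prefix scans.
-- outside the precondition, e.g. on formatear_bloques('', '', 'X', 'Y', 0, 0, 0): A returns '', B raises ValueError
import Mathlib
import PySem

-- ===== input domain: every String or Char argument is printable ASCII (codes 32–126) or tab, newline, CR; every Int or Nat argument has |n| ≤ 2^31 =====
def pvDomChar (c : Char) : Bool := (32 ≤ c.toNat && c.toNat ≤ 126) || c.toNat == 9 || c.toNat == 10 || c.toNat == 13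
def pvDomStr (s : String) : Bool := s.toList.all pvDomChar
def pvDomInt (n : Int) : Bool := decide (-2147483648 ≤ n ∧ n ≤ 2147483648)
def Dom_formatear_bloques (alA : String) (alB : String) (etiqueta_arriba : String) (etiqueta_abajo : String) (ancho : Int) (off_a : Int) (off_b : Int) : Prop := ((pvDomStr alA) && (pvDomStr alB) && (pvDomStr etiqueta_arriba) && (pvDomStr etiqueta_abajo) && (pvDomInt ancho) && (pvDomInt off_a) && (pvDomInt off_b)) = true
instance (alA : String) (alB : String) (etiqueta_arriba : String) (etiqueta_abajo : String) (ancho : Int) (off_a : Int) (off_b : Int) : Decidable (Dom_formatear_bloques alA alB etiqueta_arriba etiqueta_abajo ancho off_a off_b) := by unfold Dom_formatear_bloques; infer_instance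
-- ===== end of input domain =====

-- B replaces A's per-block re-summing of the non-gap prefixes (O(n²/ancho)) by running
-- position counters carried through one pass over the blocks (O(n)); output is identical.

-- shared formatting helpers: Python's  f"{x:<12}"  and  f"{x:>6}"  (pad, never truncate)
def pvLjust (cs : List Char) (w : Nat) : List Char := cs ++ List.replicate (w - cs.length) ' '
def pvRjust (cs : List Char) (w : Nat) : List Char := List.replicate (w - cs.length) ' ' ++ cs

-- ===== PORT A =====
-- A's  sum(1 for c in cs if c != '-')
def pvNonGapSum (cs : List Char) : Int :=
  ((cs.filter (fun c => !(c == '-'))).map (fun _ => (1 : Int))).sum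

-- A's  "".join('|' if (a == b and a != '-' and b != '-') else ('.' if a != '-' and b != '-' else ' ') for a, b in zip(sA, sB))
def pvMidA (sA sB : List Char) : List Char :=
  (sA.zip sB).map (fun p =>
    if p.1 = p.2 ∧ p.1 ≠ '-' ∧ p.2 ≠ '-' then '|'
    else if p.1 ≠ '-' ∧ p.2 ≠ '-' then '.' else ' ')

-- A's while-loop; fuel (alA.length + 1) is enough whenever ancho ≥ 1 or the string is empty
def pvLoopA (lsA lsB etA etB : List Char) (ancho off_a off_b : Int) :
    Nat → Int → List (List Char) → List (List Char)
  | 0, _, out => out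
  | fuel + 1, i, out =>
    if i < (lsA.length : Int) then
      let sA := PySem.List.slice lsA (some i) (some (i + ancho))
      let sB := PySem.List.slice lsB (some i) (some (i + ancho))
      let mid := pvMidA sA sB
      let startA := off_a + pvNonGapSum (PySem.List.slice lsA none (some i)) + 1
      let endA := startA + pvNonGapSum sA - 1
      let startB := off_b + pvNonGapSum (PySem.List.slice lsB none (some i)) + 1
      let endB := startB + pvNonGapSum sB - 1
      let l1 := pvLjust etA 12 ++ ' ' :: pvRjust (PySem.Int.toChars startA) 6 ++ ' ' :: sA ++ ' ' :: PySem.Int.toChars endA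
      let l2 := pvLjust [] 12 ++ ' ' :: pvRjust [] 6 ++ ' ' :: mid
      let l3 := (pvLjust etB 12 ++ ' ' :: pvRjust (PySem.Int.toChars startB) 6 ++ ' ' :: sB ++ ' ' :: PySem.Int.toChars endB) ++ ['\n']
      pvLoopA lsA lsB etA etB ancho off_a off_b fuel (i + ancho) (out ++ [l1, l2, l3])
    else out

def formatear_bloques (alA : String) (alB : String) (etiqueta_arriba : String) (etiqueta_abajo : String) (ancho : Int) (off_a : Int) (off_b : Int) : String :=
  String.ofList (PySem.Chars.rstrip (PySem.Chars.join ['\n']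
    (pvLoopA alA.toList alB.toList etiqueta_arriba.toList etiqueta_abajo.toList ancho off_a off_b
      (alA.toList.length + 1) 0 [])))

-- ===== PORT B =====
-- body of B's  for i in range(0, len(alA), ancho)  loop: state (lines, posA, posB)
def pvBloqueB (lsA lsB etA etB : List Char) (ancho : Int)
    (st : List (List Char) × Int × Int) (i : Int) : List (List Char) × Int × Int :=
  let lines := st.1
  let posA := st.2.1
  let posB := st.2.2
  let sA := PySem.List.slice lsA (some i) (some (i + ancho))
  let sB := PySem.List.slice lsB (some i) (some (i + ancho))
  let mid := (sA.zip sB).map (fun p =>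
    if p.1 == p.2 && p.2 != '-' then '|'
    else if p.1 != '-' && p.2 != '-' then '.' else ' ')
  let nA := (sA.length : Int) - (sA.count '-' : Int)
  let nB := (sB.length : Int) - (sB.count '-' : Int)
  let l1 := pvLjust etA 12 ++ ' ' :: pvRjust (PySem.Int.toChars (posA + 1)) 6 ++ ' ' :: sA ++ ' ' :: PySem.Int.toChars (posA + nA)
  let l2 := pvLjust [] 12 ++ ' ' :: pvRjust [] 6 ++ ' ' :: mid
  let l3 := (pvLjust etB 12 ++ ' ' :: pvRjust (PySem.Int.toChars (posB + 1)) 6 ++ ' ' :: sB ++ ' ' :: PySem.Int.toChars (posB + nB)) ++ ['\n']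
  (lines ++ [l1, l2, l3], posA + nA, posB + nB)

def formatear_bloques_alt (alA : String) (alB : String) (etiqueta_arriba : String) (etiqueta_abajo : String) (ancho : Int) (off_a : Int) (off_b : Int) : String :=
  let st := (PySem.List.pyRange 0 (alA.toList.length : Int) ancho).foldl
    (pvBloqueB alA.toList alB.toList etiqueta_arriba.toList etiqueta_abajo.toList ancho)
    ([], off_a, off_b)
  String.ofList (PySem.Chars.rstrip (PySem.Chars.join ['\n'] st.1))

-- ===== PRECONDITION & SPEC =====
-- Pre_ excludes ancho < 1 on nonempty alA, where A's while-loop never terminates, and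
-- ancho = 0 on empty alA, where B's range(0, 0, 0) raises ValueError while A returns "".
def Pre_formatear_bloques (alA : String) (alB : String) (etiqueta_arriba : String) (etiqueta_abajo : String) (ancho : Int) (off_a : Int) (off_b : Int) : Prop :=
  1 ≤ ancho ∨ (alA = "" ∧ ancho ≠ 0)
instance (alA : String) (alB : String) (etiqueta_arriba : String) (etiqueta_abajo : String) (ancho : Int) (off_a : Int) (off_b : Int) : Decidable (Pre_formatear_bloques alA alB etiqueta_arriba etiqueta_abajo ancho off_a off_b) := by unfold Pre_formatear_bloques; infer_instance

def pvWitness_formatear_bloques : String × String × String × String × Int × Int × Int :=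
  ("AC-A", "A-CA", "A", "B", 3, 0, 0)

def Spec_formatear_bloques (alA : String) (alB : String) (etiqueta_arriba : String) (etiqueta_abajo : String) (ancho : Int) (off_a : Int) (off_b : Int) (out : String) : Prop := out = formatear_bloques_alt alA alB etiqueta_arriba etiqueta_abajo ancho off_a off_b
instance (alA : String) (alB : String) (etiqueta_arriba : String) (etiqueta_abajo : String) (ancho : Int) (off_a : Int) (off_b : Int) (out : String) : Decidable (Spec_formatear_bloques alA alB etiqueta_arriba etiqueta_abajo ancho off_a off_b out) := by unfold Spec_formatear_bloques; infer_instance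

-- ===== CLAIM (what is proved, stated in full; the proofs are below) =====
def Claim_equal_formatear_bloques : Prop := ∀ (alA : String) (alB : String) (etiqueta_arriba : String) (etiqueta_abajo : String) (ancho : Int) (off_a : Int) (off_b : Int), Dom_formatear_bloques alA alB etiqueta_arriba etiqueta_abajo ancho off_a off_b → Pre_formatear_bloques alA alB etiqueta_arriba etiqueta_abajo ancho off_a off_b → Spec_formatear_bloques alA alB etiqueta_arriba etiqueta_abajo ancho off_a off_b (formatear_bloques alA alB etiqueta_arriba etiqueta_abajo ancho off_a off_b)

-- ===== LEMMAS AND PROOFS =====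

-- A's generator sum over a chunk is the non-gap count of that chunk
lemma pvNonGapSum_eq_countP (cs : List Char) :
    pvNonGapSum cs = (cs.countP (fun c => !(c == '-')) : Int) := by
  simp [pvNonGapSum, List.countP_eq_length_filter]

-- B's  len - count('-')  is the same non-gap count
lemma count_sub_eq_countP (cs : List Char) :
    (cs.length : Int) - (cs.count '-' : Int) = (cs.countP (fun c => !(c == '-')) : Int) := by
  have h := List.length_eq_countP_add_countP (fun c : Char => c == '-') (l := cs)
  have hc : cs.count '-' = cs.countP (fun c : Char => c == '-') := by
    simp [List.count_eq_countP]
  have he : cs.countP (fun c : Char => decide ¬((c == '-') = true)) =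
      cs.countP (fun c : Char => !(c == '-')) := by
    apply List.countP_congr; intro c _; simp
  omega

-- the two mid-line builders agree
lemma mid_eq (sA sB : List Char) :
    pvMidA sA sB = (sA.zip sB).map (fun p =>
      if p.1 == p.2 && p.2 != '-' then '|'
      else if p.1 != '-' && p.2 != '-' then '.' else ' ') := by
  unfold pvMidA
  apply List.map_congr_left
  rintro ⟨a, b⟩ _
  by_cases hab : a = b
  · subst hab
    by_cases ha : a = '-' <;> simp [ha]
  · have h1 : ¬(a = b ∧ a ≠ '-' ∧ b ≠ '-') := by tauto
    have h2 : (a == b && b != '-') = false := by simp [hab]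
    rw [if_neg h1, h2]
    by_cases ha : a = '-' <;> by_cases hb : b = '-' <;> simp [ha, hb]

-- splitting the non-gap prefix count at a block boundary
lemma prefix_split (ls : List Char) {i ancho : Int} (hi : 0 ≤ i) (ha : 0 < ancho) :
    ((PySem.List.slice ls none (some (i + ancho))).countP (fun c => !(c == '-')) : Int) =
      ((PySem.List.slice ls none (some i)).countP (fun c => !(c == '-')) : Int) +
      ((PySem.List.slice ls (some i) (some (i + ancho))).countP (fun c => !(c == '-')) : Int) := by
  rw [PySem.List.slice_to ls (by omega : (0:Int) ≤ i + ancho),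
      PySem.List.slice_to ls hi, PySem.List.slice_toNat ls hi (by omega)]
  have hT : List.take (i + ancho).toNat ls =
      List.take i.toNat ls ++ List.take ((i + ancho).toNat - i.toNat) (List.drop i.toNat ls) := by
    rw [← List.take_add]; congr 1; omega
  rw [hT, List.countP_append]
  push_cast; ring

-- a positive-step range is empty iff the bound is exhausted
lemma pyRange_pos_nil {a b s : Int} (hs : 0 < s) (hba : b ≤ a) :
    PySem.List.pyRange a b s = [] := by
  rw [PySem.List.pyRange_of_pos a b hs, if_neg (by omega)]
  simp

-- peeling one step off a positive-step range
lemma pyRange_pos_cons {a b s : Int} (hs : 0 < s) (hab : a < b) :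
    PySem.List.pyRange a b s = a :: PySem.List.pyRange (a + s) b s := by
  rw [PySem.List.pyRange_of_pos a b hs, PySem.List.pyRange_of_pos (a + s) b hs,
      if_pos hab]
  have hN : ((b - a + s - 1) / s).toNat =
      (if a + s < b then ((b - (a + s) + s - 1) / s).toNat else 0) + 1 := by
    by_cases h2 : a + s < b
    · rw [if_pos h2]
      have : (b - a + s - 1) / s = (b - (a + s) + s - 1) / s + 1 := by
        have := Int.add_mul_ediv_right (b - (a + s) + s - 1) 1 (by omega : s ≠ 0)
        have harg : b - a + s - 1 = b - (a + s) + s - 1 + 1 * s := by ring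
        rw [harg, this]
      rw [this]
      have hge : 0 ≤ (b - (a + s) + s - 1) / s :=
        Int.ediv_nonneg (by omega) (by omega)
      omega
    · rw [if_neg h2]
      have h1 : (b - a + s - 1) / s = 1 := by
        rw [← PySem.Int.floordiv_eq_ediv_of_pos hs,
            PySem.Int.floordiv_eq_iff_of_pos hs]
        constructor <;> omega
      omega
  rw [hN, List.range_succ_eq_map, List.map_cons, List.map_map]
  refine congrArg₂ _ (by push_cast; ring) ?_
  apply List.map_congr_left
  intro k _
  simp only [Function.comp_apply, Nat.succ_eq_add_one]
  push_cast; ring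

-- the block emitted by A equals the block emitted by B under the counter invariant
lemma bloque_eq (lsA lsB etA etB : List Char) (ancho off_a off_b i : Int)
    (out : List (List Char)) :
    pvBloqueB lsA lsB etA etB ancho
      (out, off_a + ((PySem.List.slice lsA none (some i)).countP (fun c => !(c == '-')) : Int),
            off_b + ((PySem.List.slice lsB none (some i)).countP (fun c => !(c == '-')) : Int)) i =
    (out ++ [pvLjust etA 12 ++ ' ' :: pvRjust (PySem.Int.toChars (off_a + pvNonGapSum (PySem.List.slice lsA none (some i)) + 1)) 6 ++ ' ' :: PySem.List.slice lsA (some i) (some (i + ancho)) ++ ' ' :: PySem.Int.toChars (off_a + pvNonGapSum (PySem.List.slice lsA none (some i)) + 1 + pvNonGapSum (PySem.List.slice lsA (some i) (some (i + ancho))) - 1),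
            pvLjust [] 12 ++ ' ' :: pvRjust [] 6 ++ ' ' :: pvMidA (PySem.List.slice lsA (some i) (some (i + ancho))) (PySem.List.slice lsB (some i) (some (i + ancho))),
            (pvLjust etB 12 ++ ' ' :: pvRjust (PySem.Int.toChars (off_b + pvNonGapSum (PySem.List.slice lsB none (some i)) + 1)) 6 ++ ' ' :: PySem.List.slice lsB (some i) (some (i + ancho)) ++ ' ' :: PySem.Int.toChars (off_b + pvNonGapSum (PySem.List.slice lsB none (some i)) + 1 + pvNonGapSum (PySem.List.slice lsB (some i) (some (i + ancho))) - 1)) ++ ['\n']],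
     off_a + (((PySem.List.slice lsA none (some i)).countP (fun c => !(c == '-')) : Int) + (((PySem.List.slice lsA (some i) (some (i + ancho))).countP (fun c => !(c == '-'))) : Int)),
     off_b + (((PySem.List.slice lsB none (some i)).countP (fun c => !(c == '-')) : Int) + (((PySem.List.slice lsB (some i) (some (i + ancho))).countP (fun c => !(c == '-'))) : Int))) := by
  unfold pvBloqueB
  simp only [count_sub_eq_countP, ← mid_eq, pvNonGapSum_eq_countP]
  ring_nf

-- main loop correspondence: A's while-loop with enough fuel is B's fold with counters
lemma loop_main (lsA lsB etA etB : List Char) (ancho off_a off_b : Int) (hanc : 0 < ancho) :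
    ∀ (fuel : Nat) (i : Int) (out : List (List Char)),
      0 ≤ i → (lsA.length : Int) ≤ i + fuel * ancho →
      pvLoopA lsA lsB etA etB ancho off_a off_b fuel i out =
        ((PySem.List.pyRange i (lsA.length : Int) ancho).foldl
          (pvBloqueB lsA lsB etA etB ancho)
          (out, off_a + ((PySem.List.slice lsA none (some i)).countP (fun c => !(c == '-')) : Int),
                off_b + ((PySem.List.slice lsB none (some i)).countP (fun c => !(c == '-')) : Int))).1 := by
  intro fuel
  induction fuel with
  | zero =>
    intro i out hi hb
    rw [pyRange_pos_nil hanc (by simpa using hb)]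
    rfl
  | succ fuel ih =>
    intro i out hi hb
    by_cases h : i < (lsA.length : Int)
    · simp only [pvLoopA, if_pos h]
      rw [pyRange_pos_cons hanc h, List.foldl_cons, bloque_eq,
        ← prefix_split lsA hi hanc, ← prefix_split lsB hi hanc]
      exact ih (i + ancho) _ (by omega) (by
        have : ((fuel : Int) + 1) * ancho = (fuel : Int) * ancho + ancho := by ring
        push_cast at hb ⊢
        omega)
    · rw [pvLoopA, if_neg h, pyRange_pos_nil hanc (by omega)]
      rfl

-- ===== VERDICT (by name: the statement is the Claim_ definition above) =====
theorem formatear_bloques_spec : Claim_equal_formatear_bloques := by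
  intro alA alB etA etB ancho off_a off_b _ hpre
  unfold Spec_formatear_bloques formatear_bloques formatear_bloques_alt
  rcases hpre with hanc | ⟨hA, hanc⟩
  · have h0 : PySem.List.slice alA.toList none (some 0) = [] := by
      rw [PySem.List.slice_to alA.toList le_rfl]; simp
    have h0B : PySem.List.slice alB.toList none (some 0) = [] := by
      rw [PySem.List.slice_to alB.toList le_rfl]; simp
    have hmain := loop_main alA.toList alB.toList etA.toList etB.toList ancho off_a off_b
      (by omega) (alA.toList.length + 1) 0 [] le_rfl (by
        have h1 : ((alA.toList.length : Int) + 1) * 1 ≤ ((alA.toList.length : Int) + 1) * ancho :=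
          mul_le_mul_of_nonneg_left (by omega) (by positivity)
        rw [mul_one] at h1
        push_cast at h1 ⊢
        omega)
    rw [hmain, h0, h0B]
    simp
  · subst hA
    have hlen : (String.toList "").length = 0 := rfl
    rw [hlen]
    have hr : PySem.List.pyRange 0 ((0 : Nat) : Int) ancho = [] := by
      unfold PySem.List.pyRange
      rw [if_neg hanc]
      simp
    rw [hr]
    rfl
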